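-- pv_equiv track=rewrite | github.com/jordang100/CS5 | Week9/wk9lab/hw9pr1.py | innerCells
-- ===== SOURCE A (Python) =====
-- def createBoard(width, height):
--     """
--     Returns a 2d array with "height" rows and "width" cols
--     """
--     A = []
--     for row in range(height):
--         A += [[0]*width]        # use the above fun. so that SOMETHING is one row!!
--     return A
--
-- def innerCells(w, h):
--     """
--     Returns a 2d array that has all live cells—with the value of 1—except
--     for a one-cell-wide border of empty cells (with the value of 0) around
--     the edge of the 2d array
--     """
--     A = createBoard(w, h)
--
--     for row in range(1,h-1):
--         for col in range(1,w-1):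
--             if 0 < row < h-1 and 0 < col < w-1:
--                 A[row][col] = 1
--             else:
--                 A[row][col] = 0
--     return A
-- ===== SOURCE B (Python) =====
-- def innerCells(w, h):
--     """
--     Returns a 2d array that has all live cells (1) except for a
--     one-cell-wide border of empty cells (0) around the edge.
--     Builds the two row templates once and classifies each row,
--     copying the template so rows stay independent lists.
--     """
--     if h <= 0:
--         return []
--     zero_row = [0] * w
--     if w >= 2:
--         inner_row = [0] + [1] * (w - 2) + [0]
--     else:
--         inner_row = zero_row
--     return [list(inner_row) if 0 < r < h - 1 else list(zero_row) for r in range(h)]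
-- ===== Notes on version B (the rewrite author's own statement) =====
-- stated objective: simpler
-- what changed: B builds the zero-row and interior-row templates once and assembles the grid by classifying each row index (border vs interior), instead of A's allocate-an-all-zero-grid-then-mutate-each-interior-cell nested loops.
import Mathlib
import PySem

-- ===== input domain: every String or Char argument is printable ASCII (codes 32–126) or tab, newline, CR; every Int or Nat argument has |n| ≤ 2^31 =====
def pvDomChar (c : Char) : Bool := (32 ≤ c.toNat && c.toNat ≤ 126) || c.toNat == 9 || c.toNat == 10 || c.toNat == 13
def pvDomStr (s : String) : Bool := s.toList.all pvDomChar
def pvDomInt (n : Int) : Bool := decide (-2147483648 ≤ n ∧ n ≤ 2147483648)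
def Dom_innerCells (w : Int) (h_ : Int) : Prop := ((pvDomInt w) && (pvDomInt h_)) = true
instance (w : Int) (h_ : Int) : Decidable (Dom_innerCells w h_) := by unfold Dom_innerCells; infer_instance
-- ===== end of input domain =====

-- B builds the zero-row and interior-row templates once and classifies each row,
-- instead of A's allocate-all-zeros-then-mutate-interior-cells loops (objective: simpler).
-- A mutates only its freshly created local grid, so return-value equivalence is the whole story.

-- ===== PORT A =====
-- createBoard: A = []; for row in range(height): A += [[0]*width]
def createBoardL (width height : Int) : List (List Int) :=
  (PySem.List.pyRange 0 height 1).foldl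
    (fun A _ => A ++ [PySem.List.pyRepeat [(0 : Int)] width]) []

-- A[row][col] = v is ported as read row, set col, write row back; exact here because
-- createBoard's rows are distinct fresh lists and all indices are in range.
def innerCells (w : Int) (h_ : Int) : List (List Int) :=
  (PySem.List.pyRange 1 (h_ - 1) 1).foldl
    (fun A row =>
      (PySem.List.pyRange 1 (w - 1) 1).foldl
        (fun A col =>
          if 0 < row ∧ row < h_ - 1 ∧ 0 < col ∧ col < w - 1 then
            PySem.List.pySetD A row (PySem.List.pySetD (PySem.List.pyGetD A row []) col 1)
          else
            PySem.List.pySetD A row (PySem.List.pySetD (PySem.List.pyGetD A row []) col 0))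
        A)
    (createBoardL w h_)

-- ===== PORT B =====
def zrowL (w : Int) : List Int := PySem.List.pyRepeat [(0 : Int)] w

def irowL (w : Int) : List Int :=
  if 2 ≤ w then [0] ++ PySem.List.pyRepeat [(1 : Int)] (w - 2) ++ [0] else zrowL w

-- list(template) only copies, so it is the identity on values
def innerCells_alt (w : Int) (h_ : Int) : List (List Int) :=
  if h_ ≤ 0 then []
  else
    (PySem.List.pyRange 0 h_ 1).map
      (fun r => if 0 < r ∧ r < h_ - 1 then irowL w else zrowL w)

-- ===== PRECONDITION & SPEC =====
def Spec_innerCells (w : Int) (h_ : Int) (out : List (List Int)) : Prop := out = innerCells_alt w h_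
instance (w : Int) (h_ : Int) (out : List (List Int)) : Decidable (Spec_innerCells w h_ out) := by unfold Spec_innerCells; infer_instance

-- ===== CLAIM (what is proved, stated in full; the proofs are below) =====
def Claim_equal_innerCells : Prop := ∀ (w : Int) (h_ : Int), Dom_innerCells w h_ → Spec_innerCells w h_ (innerCells w h_)

-- ===== LEMMAS AND PROOFS =====

theorem zrowL_eq (w : Int) : zrowL w = List.replicate w.toNat 0 := by
  simp [zrowL, PySem.List.pyRepeat_singleton]

-- appending a constant row per loop iteration is replicate
theorem foldl_append_const {α β : Type} (l : List β) (c : α) (init : List α) :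
    l.foldl (fun A _ => A ++ [c]) init = init ++ List.replicate l.length c := by
  induction l generalizing init with
  | nil => simp
  | cons x xs ih => simp [List.foldl_cons, ih, List.replicate_succ]

theorem createBoardL_eq (w h_ : Int) :
    createBoardL w h_ = List.replicate h_.toNat (zrowL w) := by
  rw [createBoardL, foldl_append_const]
  simp only [List.nil_append]
  congr 1
  simp [PySem.List.length_pyRange_one]

theorem getD_set_self_aux (A : List (List Int)) (r : Nat) (hr : r < A.length) (x : List Int) :
    (A.set r x).getD r [] = x := by
  rw [List.getD_eq_getElem _ _ (by simpa using hr), List.getElem_set_self]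

-- an inner loop that only touches row r is a set of row r with the folded row
theorem foldl_row_update (g : List Int → Int → List Int) (cs : List Int)
    (A : List (List Int)) (r : Nat) (hr : r < A.length) :
    cs.foldl (fun B col => PySem.List.pySetD B (r : Int) (g (PySem.List.pyGetD B (r : Int) []) col)) A
      = A.set r (cs.foldl g (PySem.List.pyGetD A (r : Int) [])) := by
  induction cs generalizing A with
  | nil =>
      simp only [List.foldl_nil, PySem.List.pyGetD_natCast]
      rw [List.getD_eq_getElem _ _ hr]
      simp
  | cons c cs ih =>
      simp only [List.foldl_cons]
      rw [ih _ (by simpa using hr)]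
      simp only [PySem.List.pyGetD_natCast, PySem.List.pySetD_natCast]
      rw [getD_set_self_aux _ _ hr, List.set_set]

-- filling columns 1..m of an all-zero row
theorem rowfold_aux (W m : Nat) (hm : m + 2 ≤ W) :
    (PySem.List.pyRange 1 (1 + (m : Int)) 1).foldl (fun r col => PySem.List.pySetD r col 1)
        (List.replicate W (0 : Int))
      = [0] ++ List.replicate m 1 ++ List.replicate (W - 1 - m) 0 := by
  induction m with
  | zero =>
      simp only [Nat.cast_zero]
      rw [show (1 + (0:Int)) = 1 by ring, PySem.List.pyRange_one_eq_nil (by omega)]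
      simp
      rw [show W = (W - 1) + 1 by omega, List.replicate_succ]
      simp
  | succ m ih =>
      rw [show (1 + ((m+1 : Nat) : Int)) = (1 + (m : Int)) + 1 by push_cast; ring,
        PySem.List.pyRange_one_succ_right (a := 1) (b := 1 + (m : Int)) (by omega), List.foldl_append,
        ih (by omega)]
      simp only [List.foldl_cons, List.foldl_nil]
      rw [show (1 + (m : Int)) = ((m + 1 : Nat) : Int) by push_cast; ring,
        PySem.List.pySetD_natCast]
      rw [show W - 1 - m = (W - 1 - (m+1)) + 1 by omega, List.replicate_succ]
      rw [show ([(0:Int)] ++ List.replicate m 1 ++ (0 :: List.replicate (W - 1 - (m+1)) 0))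
            = ([(0:Int)] ++ List.replicate m 1) ++ (0 :: List.replicate (W - 1 - (m+1)) 0) by simp]
      rw [List.set_append_right _ _ (by simp)]
      simp [List.replicate_succ']

-- the inner loop turns a zero row into the interior-row template, for every w
theorem rowfold (w : Int) :
    (PySem.List.pyRange 1 (w - 1) 1).foldl (fun r col => PySem.List.pySetD r col 1) (zrowL w)
      = irowL w := by
  rcases le_or_gt w 2 with hw | hw
  · rw [PySem.List.pyRange_one_eq_nil (by omega), List.foldl_nil]
    rcases lt_or_ge w 2 with h2 | h2
    · simp [irowL, not_le.mpr h2]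
    · have hw2 : w = 2 := le_antisymm hw h2
      subst hw2
      simp [irowL, zrowL, PySem.List.pyRepeat_singleton]
  · have h3 : 3 ≤ w := hw
    have : w - 1 = 1 + ((w.toNat - 2 : Nat) : Int) := by omega
    rw [this, zrowL_eq, rowfold_aux w.toNat (w.toNat - 2) (by omega)]
    rw [irowL, if_pos (by omega)]
    congr 1
    · congr 1
      simp [PySem.List.pyRepeat_singleton]
      omega
    · rw [show w.toNat - 1 - (w.toNat - 2) = 1 by omega]
      rfl

-- the interior fold over one row of port A, with the always-true guard removed
theorem inner_step (w h_ row : Int) (hrow : 0 < row ∧ row < h_ - 1) (A : List (List Int)) :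
    (PySem.List.pyRange 1 (w - 1) 1).foldl
        (fun B col =>
          if 0 < row ∧ row < h_ - 1 ∧ 0 < col ∧ col < w - 1 then
            PySem.List.pySetD B row (PySem.List.pySetD (PySem.List.pyGetD B row []) col 1)
          else
            PySem.List.pySetD B row (PySem.List.pySetD (PySem.List.pyGetD B row []) col 0)) A
      = (PySem.List.pyRange 1 (w - 1) 1).foldl
          (fun B col => PySem.List.pySetD B row (PySem.List.pySetD (PySem.List.pyGetD B row []) col 1)) A := by
  apply PySem.List.foldl_congr_mem
  intro B col hc
  rw [PySem.List.mem_pyRange_one] at hc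
  rw [if_pos ⟨hrow.1, hrow.2, by omega, by omega⟩]

-- the outer loop: rows 1..m become the interior template
theorem outerfold (w h_ : Int) (m : Nat) (hm : (m : Int) + 2 ≤ h_) :
    (PySem.List.pyRange 1 (1 + (m : Int)) 1).foldl
        (fun A row =>
          (PySem.List.pyRange 1 (w - 1) 1).foldl
            (fun B col =>
              if 0 < row ∧ row < h_ - 1 ∧ 0 < col ∧ col < w - 1 then
                PySem.List.pySetD B row (PySem.List.pySetD (PySem.List.pyGetD B row []) col 1)
              else
                PySem.List.pySetD B row (PySem.List.pySetD (PySem.List.pyGetD B row []) col 0)) A)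
        (List.replicate h_.toNat (zrowL w))
      = [zrowL w] ++ List.replicate m (irowL w)
          ++ List.replicate (h_.toNat - 1 - m) (zrowL w) := by
  induction m with
  | zero =>
      simp only [Nat.cast_zero]
      rw [show (1 + (0:Int)) = 1 by ring,
        PySem.List.pyRange_one_eq_nil (a := 1) (b := 1) (by omega)]
      simp only [List.foldl_nil, List.replicate_zero, List.append_nil]
      rw [show h_.toNat = (h_.toNat - 1) + 1 by omega, List.replicate_succ]
      simp
  | succ m ih =>
      rw [show (1 + ((m+1 : Nat) : Int)) = (1 + (m : Int)) + 1 by push_cast; ring,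
        PySem.List.pyRange_one_succ_right (a := 1) (b := 1 + (m : Int)) (by omega), List.foldl_append,
        ih (by push_cast at hm ⊢; omega)]
      simp only [List.foldl_cons, List.foldl_nil]
      rw [inner_step w h_ (1 + (m : Int)) ⟨by omega, by omega⟩]
      rw [show (1 + (m : Int)) = ((m + 1 : Nat) : Int) by push_cast; ring]
      have hlen : m + 1 < ([zrowL w] ++ List.replicate m (irowL w)
          ++ List.replicate (h_.toNat - 1 - m) (zrowL w)).length := by
        simp; omega
      rw [foldl_row_update (fun x col => PySem.List.pySetD x col 1) _ _ (m+1) hlen]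
      have hget : PySem.List.pyGetD ([zrowL w] ++ List.replicate m (irowL w)
          ++ List.replicate (h_.toNat - 1 - m) (zrowL w)) ((m+1 : Nat) : Int) [] = zrowL w := by
        rw [PySem.List.pyGetD_natCast, List.getD_eq_getElem _ _ hlen]
        rw [List.getElem_append_right (by simp)]
        simp only [List.getElem_replicate]
      rw [hget, rowfold]
      rw [show h_.toNat - 1 - m = (h_.toNat - 1 - (m+1)) + 1 by omega, List.replicate_succ]
      rw [show ([zrowL w] ++ List.replicate m (irowL w)
            ++ (zrowL w :: List.replicate (h_.toNat - 1 - (m+1)) (zrowL w)))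
          = ([zrowL w] ++ List.replicate m (irowL w))
            ++ (zrowL w :: List.replicate (h_.toNat - 1 - (m+1)) (zrowL w)) by simp]
      rw [List.set_append_right _ _ (by simp)]
      simp [List.replicate_succ']

-- the two ports agree on every input
theorem main_eq (w h_ : Int) : innerCells w h_ = innerCells_alt w h_ := by
  rcases le_or_gt h_ 2 with hh | hh
  · rw [innerCells, PySem.List.pyRange_one_eq_nil (a := 1) (b := h_ - 1) (by omega),
      List.foldl_nil, createBoardL_eq]
    rcases le_or_gt h_ 0 with h0 | h0
    · rw [innerCells_alt, if_pos h0]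
      simp [Int.toNat_of_nonpos h0]
    · interval_cases h_
      · simp [innerCells_alt, PySem.List.pyRange_one, List.range_succ]
      · simp [innerCells_alt, PySem.List.pyRange_one, List.range_succ]
  · -- h_ ≥ 3
    have hout := outerfold w h_ (h_.toNat - 2) (by omega)
    rw [show (1 + ((h_.toNat - 2 : Nat) : Int)) = h_ - 1 by omega] at hout
    rw [innerCells, createBoardL_eq, hout]
    rw [show h_.toNat - 1 - (h_.toNat - 2) = 1 by omega]
    rw [innerCells_alt, if_neg (by omega),
      PySem.List.pyRange_one_append 0 1 h_ (by omega) (by omega),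
      PySem.List.pyRange_one_append 1 (h_ - 1) h_ (by omega) (by omega),
      show PySem.List.pyRange 0 1 1 = [0] from PySem.List.pyRange_one_singleton 0,
      show PySem.List.pyRange (h_ - 1) h_ 1 = [h_ - 1] by
        have hs := PySem.List.pyRange_one_singleton (h_ - 1)
        rwa [show h_ - 1 + 1 = h_ by ring] at hs]
    simp only [List.map_append, List.map_cons, List.map_nil]
    rw [if_neg (by omega), if_neg (by omega)]
    rw [List.map_congr_left (g := fun _ => irowL w) (fun r hr => by
      rw [PySem.List.mem_pyRange_one] at hr
      exact if_pos ⟨by omega, by omega⟩)]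
    rw [List.map_const', PySem.List.length_pyRange_one,
      show ((h_ - 1 - 1).toNat) = h_.toNat - 2 by omega]
    simp

-- ===== VERDICT (by name: the statement is the Claim_ definition above) =====
theorem innerCells_spec : Claim_equal_innerCells := by
  intro w h_ _
  unfold Spec_innerCells
  exact main_eq w h_
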